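-- pv_equiv track=rewrite | github.com/jahorta/SALSA | SALSA/Scripts/script_decoder.py | _get_longest_numerical_substring
-- ===== SOURCE A (Python) =====
-- def _get_longest_numerical_substring(string: str):
--     cur_digits = ''
--     max_digits = ''
--     cur_char_ind = 0
--     while cur_char_ind < len(string):
--         if string[cur_char_ind] in '0123456789':
--             cur_digits += string[cur_char_ind]
--             if len(cur_digits) >= len(max_digits):
--                 max_digits = cur_digits
--         else:
--             cur_digits = ''
--         cur_char_ind += 1
--     return max_digits
-- ===== SOURCE B (Python) =====
-- def _get_longest_numerical_substring(string: str):
--     # Phase 1: tokenize into maximal digit runs (with empty pieces where runs break).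
--     runs = []
--     cur = []
--     for ch in string:
--         if '0' <= ch <= '9':
--             cur.append(ch)
--         else:
--             runs.append(''.join(cur))
--             cur = []
--     runs.append(''.join(cur))
--     # Phase 2: scan the runs; >= keeps the last run of maximal length, like A.
--     best = ''
--     for r in runs:
--         if len(r) >= len(best):
--             best = r
--     return best
-- ===== Notes on version B (the rewrite author's own statement) =====
-- stated objective: alternative
-- what changed: Replaces A's single char-by-char loop that grows cur_digits and re-checks the maximum on every digit with a two-phase pass: first tokenize the string into its maximal digit runs, then a separate scan over the run list keeps the last run at least as long as the best (>= reproduces A's last-wins tie-break).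
import Mathlib
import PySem

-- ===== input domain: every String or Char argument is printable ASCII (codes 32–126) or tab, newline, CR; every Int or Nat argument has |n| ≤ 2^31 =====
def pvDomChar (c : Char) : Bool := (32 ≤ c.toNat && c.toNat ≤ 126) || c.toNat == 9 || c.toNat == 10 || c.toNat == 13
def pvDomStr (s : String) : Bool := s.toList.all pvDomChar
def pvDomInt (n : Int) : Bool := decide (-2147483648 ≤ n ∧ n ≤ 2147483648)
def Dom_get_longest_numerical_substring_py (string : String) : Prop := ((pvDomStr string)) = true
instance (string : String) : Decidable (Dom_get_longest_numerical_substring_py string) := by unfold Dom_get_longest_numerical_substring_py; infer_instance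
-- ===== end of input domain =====

-- B replaces A's single char-by-char max-tracking loop with a two-phase tokenize-then-scan
-- (split into maximal digit runs, then pick the last longest run); same O(n) cost, alternative structure.

-- ===== PORT A =====
-- A's while loop visits the characters in index order; ported as a foldl over the char list
-- with the same (cur_digits, max_digits) state and the same branch order.
def pvStepA (st : List Char × List Char) (c : Char) : List Char × List Char :=
  if ("0123456789".toList.contains c) then
    let cur := st.1 ++ [c]
    if st.2.length ≤ cur.length then (cur, cur) else (cur, st.2)
  else
    ([], st.2)

def get_longest_numerical_substring_py (string : String) : String :=
  String.ofList (string.toList.foldl pvStepA ([], [])).2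

-- ===== PORT B =====
-- Phase 1 of Source B: build the list of digit runs (completed runs + the trailing current run).
def pvTok (st : List (List Char) × List Char) (c : Char) : List (List Char) × List Char :=
  if ('0' ≤ c ∧ c ≤ '9' : Prop) then (st.1, st.2 ++ [c]) else (st.1 ++ [st.2], [])

-- Phase 2 of Source B: keep the last run at least as long as the best so far.
def pvPick (b r : List Char) : List Char := if b.length ≤ r.length then r else b

def get_longest_numerical_substring_py_alt (string : String) : String :=
  let st := string.toList.foldl pvTok ([], [])
  String.ofList ((st.1 ++ [st.2]).foldl pvPick [])

-- ===== PRECONDITION & SPEC =====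
def Spec_get_longest_numerical_substring_py (string : String) (out : String) : Prop := out = get_longest_numerical_substring_py_alt string
instance (string : String) (out : String) : Decidable (Spec_get_longest_numerical_substring_py string out) := by unfold Spec_get_longest_numerical_substring_py; infer_instance

-- ===== CLAIM (what is proved, stated in full; the proofs are below) =====
def Claim_equal_get_longest_numerical_substring_py : Prop := ∀ (string : String), Dom_get_longest_numerical_substring_py string → Spec_get_longest_numerical_substring_py string (get_longest_numerical_substring_py string)

-- ===== LEMMAS AND PROOFS =====

-- the two digit tests agree
theorem pvIsDig_eq (c : Char) :
    ("0123456789".toList.contains c) = decide ('0' ≤ c ∧ c ≤ '9') := by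
  have h : "0123456789".toList = ['0','1','2','3','4','5','6','7','8','9'] := by decide
  rw [h, Bool.eq_iff_iff]
  simp only [List.contains_cons, List.contains_nil, Bool.or_false, Bool.or_eq_true,
    beq_iff_eq, decide_eq_true_eq]
  constructor
  · rintro (rfl|rfl|rfl|rfl|rfl|rfl|rfl|rfl|rfl|rfl) <;> exact ⟨by decide, by decide⟩
  · rintro ⟨h1, h2⟩
    have n1 : 48 ≤ c.toNat := h1
    have n2 : c.toNat ≤ 57 := h2
    have hc : c = Char.ofNat c.toNat := (Char.ofNat_toNat c).symm
    rw [hc]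
    interval_cases c.toNat <;> decide

-- reference tokenization, built back-to-front: (head run, remaining runs)
def pvSplit : List Char → List Char × List (List Char)
  | [] => ([], [])
  | c :: cs =>
    let p := pvSplit cs
    if ('0' ≤ c ∧ c ≤ '9' : Prop) then (c :: p.1, p.2) else ([], p.1 :: p.2)

-- A's fold equals a pick-scan over the runs, provided the state invariant holds
theorem pvA_runs (l : List Char) : ∀ cur mx : List Char,
    (cur.length < mx.length ∨ cur = mx) →
    (l.foldl pvStepA (cur, mx)).2
      = ((cur ++ (pvSplit l).1) :: (pvSplit l).2).foldl pvPick mx := by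
  induction l with
  | nil =>
    intro cur mx h
    simp [pvSplit, pvPick]
    rcases h with h | h
    · intro h2; omega
    · intro _; exact h.symm
  | cons c cs ih =>
    intro cur mx h
    simp only [List.foldl, pvStepA, pvSplit, pvIsDig_eq]
    by_cases hc : ('0' ≤ c ∧ c ≤ '9')
    · rw [if_pos hc, if_pos (decide_eq_true hc)]
      by_cases hl : mx.length ≤ (cur ++ [c]).length
      · simp only [hl, if_true]
        rw [ih (cur ++ [c]) (cur ++ [c]) (Or.inr rfl)]
        simp only [List.foldl, pvPick]
        have h1 : mx.length ≤ cur.length + ((pvSplit cs).1.length + 1) := by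
          simp at hl; omega
        simp [h1]
      · simp only [hl, if_false]
        rw [ih (cur ++ [c]) mx (Or.inl (by omega))]
        simp
    · rw [if_neg hc, if_neg (by simp [hc] : ¬ (decide ('0' ≤ c ∧ c ≤ '9') = true))]
      have h0 : ([] : List Char).length < mx.length ∨ ([] : List Char) = mx := by
        cases mx with
        | nil => exact Or.inr rfl
        | cons a as => exact Or.inl (by simp)
      rw [ih [] mx h0]
      simp only [List.nil_append, List.append_nil, List.foldl, pvPick]
      have hq : mx.length ≤ cur.length → cur = mx := by
        rcases h with h | h
        · intro h2; omega
        · intro _; exact h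
      by_cases hm : mx.length ≤ cur.length
      · simp [hm, hq hm]
      · simp [hm]

-- B's tokenizing fold produces exactly the pvSplit runs
theorem pvB_runs (l : List Char) : ∀ (runs : List (List Char)) (cur : List Char),
    (l.foldl pvTok (runs, cur)).1 ++ [(l.foldl pvTok (runs, cur)).2]
      = runs ++ (cur ++ (pvSplit l).1) :: (pvSplit l).2 := by
  induction l with
  | nil => intro runs cur; simp [pvSplit]
  | cons c cs ih =>
    intro runs cur
    simp only [List.foldl, pvTok, pvSplit]
    by_cases hc : ('0' ≤ c ∧ c ≤ '9')
    · rw [if_pos hc, if_pos hc]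
      rw [ih runs (cur ++ [c])]
      simp
    · rw [if_neg hc, if_neg hc]
      rw [ih (runs ++ [cur]) []]
      simp

-- ===== VERDICT (by name: the statement is the Claim_ definition above) =====
theorem get_longest_numerical_substring_py_spec : Claim_equal_get_longest_numerical_substring_py := by
  intro s _
  unfold Spec_get_longest_numerical_substring_py
  unfold get_longest_numerical_substring_py get_longest_numerical_substring_py_alt
  have hA := pvA_runs s.toList [] [] (Or.inr rfl)
  have hB := pvB_runs s.toList [] []
  simp only [List.nil_append] at hA hB
  show String.ofList (List.foldl pvStepA ([], []) s.toList).2 = _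
  rw [hA]
  dsimp only [get_longest_numerical_substring_py_alt]
  rw [← hB]
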